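-- pv_equiv track=rewrite | github.com/gabriellaec/desoft-analise-exercicios | backup/user_022/ch130_2020_04_01_17_55_53_276435.py | monta_mala
-- ===== SOURCE A (Python) =====
-- def monta_mala(pesagem):
--     resultado=[]
--     w=0
--     for i in range (len(pesagem)):
--         w+=pesagem[i]
--         if w>23:
--             break
--         resultado.append(pesagem[i])
--     return resultado
-- ===== SOURCE B (Python) =====
-- def monta_mala(pesagem):
--     totals = []
--     t = 0
--     for p in pesagem:
--         t += p
--         totals.append(t)
--     cut = next((i for i, s in enumerate(totals) if s > 23), len(pesagem))
--     return pesagem[:cut]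
-- ===== Notes on version B (the rewrite author's own statement) =====
-- stated objective: alternative
-- what changed: Replaces the interleaved accumulate-check-append loop with a prefix-sum table built first, then a scan for the first cumulative sum exceeding 23, returning a slice of the input.
import Mathlib
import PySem

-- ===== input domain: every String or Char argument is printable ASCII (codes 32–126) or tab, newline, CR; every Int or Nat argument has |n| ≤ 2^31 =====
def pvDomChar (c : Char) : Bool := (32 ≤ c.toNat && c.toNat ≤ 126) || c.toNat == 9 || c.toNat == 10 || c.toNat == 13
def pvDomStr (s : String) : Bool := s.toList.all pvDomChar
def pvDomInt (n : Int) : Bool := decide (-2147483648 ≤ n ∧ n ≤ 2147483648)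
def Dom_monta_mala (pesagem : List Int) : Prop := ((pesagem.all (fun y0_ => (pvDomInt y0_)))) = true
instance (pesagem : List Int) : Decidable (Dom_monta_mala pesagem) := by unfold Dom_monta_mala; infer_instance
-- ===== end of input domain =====

-- B replaces A's interleaved accumulate-check-append loop by a prefix-sum table, a scan for the first sum > 23, and a slice (objective: alternative decomposition, same cost).


-- ===== PORT A =====
-- loop of A: add pesagem[i] to w, break if w>23, else append
def montaLoop (xs : List Int) (w : Int) (resultado : List Int) : List Int :=
  match xs with
  | [] => resultado
  | x :: rest =>
      if w + x > 23 then resultado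
      else montaLoop rest (w + x) (resultado ++ [x])

def monta_mala (pesagem : List Int) : List Int := montaLoop pesagem 0 []

-- ===== PORT B =====
-- B: build the prefix-sum table, find the first index whose sum exceeds 23 (default length), slice
def prefixSums (xs : List Int) (t : Int) : List Int :=
  match xs with
  | [] => []
  | x :: rest => (t + x) :: prefixSums rest (t + x)

def firstOver23 (sums : List Int) : Nat :=
  match sums with
  | [] => 0
  | s :: rest => if s > 23 then 0 else 1 + firstOver23 rest

def monta_mala_alt (pesagem : List Int) : List Int :=
  pesagem.take (firstOver23 (prefixSums pesagem 0))

-- ===== PRECONDITION & SPEC =====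
def Spec_monta_mala (pesagem : List Int) (out : List Int) : Prop := out = monta_mala_alt pesagem
instance (pesagem : List Int) (out : List Int) : Decidable (Spec_monta_mala pesagem out) := by unfold Spec_monta_mala; infer_instance

-- ===== CLAIM (what is proved, stated in full; the proofs are below) =====
def Claim_equal_monta_mala : Prop := ∀ (pesagem : List Int), Dom_monta_mala pesagem → Spec_monta_mala pesagem (monta_mala pesagem)

-- ===== LEMMAS AND PROOFS =====

-- ===== VERDICT (by name: the statement is the Claim_ definition above) =====
theorem montaLoop_eq (xs : List Int) (w : Int) (acc : List Int) :
    montaLoop xs w acc = acc ++ xs.take (firstOver23 (prefixSums xs w)) := by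
  induction xs generalizing w acc with
  | nil => simp [montaLoop, prefixSums, firstOver23]
  | cons x rest ih =>
      simp only [montaLoop, prefixSums, firstOver23]
      split_ifs with h
      · simp
      · rw [ih, Nat.add_comm]; simp

theorem monta_mala_spec : Claim_equal_monta_mala := by
  intro pesagem _
  unfold Spec_monta_mala monta_mala monta_mala_alt
  rw [montaLoop_eq]; simp
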